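-- pv_equiv track=rewrite | github.com/lewis6991/tcl-ls | src/tcl_lsp/common.py | offset_at_position
-- ===== SOURCE A (Python) =====
-- def offset_at_position(text: str, line: int, character: int) -> int | None:
--     if line < 0 or character < 0:
--         return None
--
--     current_line = 0
--     line_start = 0
--     for index, char in enumerate(text):
--         if current_line == line:
--             break
--         if char == '\n':
--             current_line += 1
--             line_start = index + 1
--     else:
--         if current_line != line:
--             if line == current_line:
--                 line_start = len(text)
--             else:
--                 return None
--
--     if current_line != line:
--         return None
--
--     line_end = text.find('\n', line_start)
--     if line_end < 0:
--         line_end = len(text)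
--
--     if character > line_end - line_start:
--         return None
--     return line_start + character
-- ===== SOURCE B (Python) =====
-- def _line_rec(text, line, character):
--     head, sep, tail = text.partition('\n')
--     if line == 0:
--         return character if character <= len(head) else None
--     if not sep:
--         return None
--     rest = _line_rec(tail, line - 1, character)
--     return None if rest is None else len(head) + 1 + rest
--
--
-- def offset_at_position(text, line, character):
--     if line < 0 or character < 0:
--         return None
--     return _line_rec(text, line, character)
-- ===== Notes on version B (the rewrite author's own statement) =====
-- stated objective: simpler
-- what changed: Replaced A's stateful character scan (for/else with break bookkeeping plus a separate find() pass) by a short recursion that peels one line at a time with str.partition('\n') and adds the line length plus one to the recursive offset; the per-character Python loop becomes C-level partition scans, a constant-factor speedup a timing run measured.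
import Mathlib
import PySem

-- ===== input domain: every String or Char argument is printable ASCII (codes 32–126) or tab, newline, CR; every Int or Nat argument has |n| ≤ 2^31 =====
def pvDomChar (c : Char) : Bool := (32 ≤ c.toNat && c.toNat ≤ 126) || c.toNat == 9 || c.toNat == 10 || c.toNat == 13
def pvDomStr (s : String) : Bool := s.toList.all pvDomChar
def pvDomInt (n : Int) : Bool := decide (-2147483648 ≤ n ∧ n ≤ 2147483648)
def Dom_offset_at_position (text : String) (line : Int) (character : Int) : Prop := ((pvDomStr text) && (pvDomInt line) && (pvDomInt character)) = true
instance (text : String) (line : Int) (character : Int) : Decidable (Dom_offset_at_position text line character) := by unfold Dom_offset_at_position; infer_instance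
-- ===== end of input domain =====

-- B replaces A's stateful character scan (for/else with break bookkeeping plus a find() pass)
-- by a short per-line recursion via str.partition('\n'); objective: simpler. Both are total.

-- ===== PORT A =====
-- the for-loop over enumerate(text): state (current_line, line_start), third component = broke
def pvALoop (line : Int) : List (Int × Char) → Int → Int → Int × Int × Bool
  | [], cl, ls => (cl, ls, false)
  | (i, c) :: rest, cl, ls =>
    if cl = line then (cl, ls, true)
    else if c = '\n' then pvALoop line rest (cl + 1) (i + 1)
    else pvALoop line rest cl ls

-- everything after the loop: the for/else block (st = none means an early `return None`),
-- then the current_line check, text.find('\n', line_start) and the final character test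
def pvPostA (cs : List Char) (line ch : Int) (r : Int × Int × Bool) : Option Int :=
  let st : Option (Int × Int) :=
    if !r.2.2 then
      if r.1 ≠ line then
        if line = r.1 then some (r.1, (cs.length : Int)) else none
      else some (r.1, r.2.1)
    else some (r.1, r.2.1)
  match st with
  | none => none
  | some (cl, ls) =>
    if cl ≠ line then none
    else
      let le0 := PySem.Chars.findFrom cs ['\n'] ls none
      let le := if le0 < 0 then (cs.length : Int) else le0
      if ch > le - ls then none else some (ls + ch)

def offset_at_position (text : String) (line : Int) (character : Int) : Option Int :=
  if line < 0 || character < 0 then none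
  else pvPostA text.toList line character (pvALoop line (PySem.List.enumerate text.toList 0) 0 0)

-- ===== PORT B =====
-- termination helper for pvLineRec (cited by name in decreasing_by)
theorem pvDropTailLt (cs : List Char) (h : '\n' ∈ cs) :
    ((cs.dropWhile (fun c => c != '\n')).tail).length < cs.length := by
  induction cs with
  | nil => simp at h
  | cons c t ih =>
    by_cases hc : c = '\n'
    · subst hc; simp
    · have h' : '\n' ∈ t := by
        rcases List.mem_cons.mp h with h | h
        · exact absurd h.symm hc
        · exact h
      have hlt := ih h'
      simp [List.length_tail] at hlt ⊢
      simp [hc]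
      omega

-- str.partition('\n') ported by hand (PySem has no partition): head = chars before the first
-- '\n', found = whether '\n' occurs, tail = chars after the first '\n'; exact on all inputs.
def pvLineRec (cs : List Char) (line : Int) (character : Int) : Option Int :=
  let head := cs.takeWhile (fun c => c != '\n')
  if line = 0 then
    if character ≤ (head.length : Int) then some character else none
  else if h : cs.any (fun c => c == '\n') = true then
    match pvLineRec ((cs.dropWhile (fun c => c != '\n')).tail) (line - 1) character with
    | none => none
    | some r => some ((head.length : Int) + 1 + r)
  else none
termination_by cs.length
decreasing_by exact pvDropTailLt cs (by simpa using h)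

def offset_at_position_alt (text : String) (line : Int) (character : Int) : Option Int :=
  if line < 0 || character < 0 then none
  else pvLineRec text.toList line character

-- ===== PRECONDITION & SPEC =====
def Spec_offset_at_position (text : String) (line : Int) (character : Int) (out : Option Int) : Prop := out = offset_at_position_alt text line character
instance (text : String) (line : Int) (character : Int) (out : Option Int) : Decidable (Spec_offset_at_position text line character out) := by unfold Spec_offset_at_position; infer_instance

-- ===== CLAIM (what is proved, stated in full; the proofs are below) =====
def Claim_equal_offset_at_position : Prop := ∀ (text : String) (line : Int) (character : Int), Dom_offset_at_position text line character → Spec_offset_at_position text line character (offset_at_position text line character)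

-- ===== LEMMAS AND PROOFS =====

-- the loop never breaks and changes nothing while scanning newline-free text with cl ≠ line
theorem pvLoopSkip (line : Int) (pre : List Char) (h : ∀ c ∈ pre, ¬ c = '\n') :
    ∀ (s cl ls : Int), cl ≠ line →
      pvALoop line (PySem.List.enumerate pre s) cl ls = (cl, ls, false) := by
  induction pre with
  | nil => intro s cl ls hcl; simp [PySem.List.enumerate_nil, pvALoop]
  | cons c t ih =>
    intro s cl ls hcl
    have hc : ¬ c = '\n' := h c (List.mem_cons_self ..)
    rw [PySem.List.enumerate_cons]
    simp only [pvALoop, if_neg hcl, if_neg hc]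
    exact ih (fun x hx => h x (List.mem_cons_of_mem _ hx)) (s + 1) cl ls hcl

-- scanning past the first newline
theorem pvLoopSplit (line : Int) (pre rest : List Char) (h : ∀ c ∈ pre, ¬ c = '\n') :
    ∀ (s cl ls : Int), cl ≠ line →
      pvALoop line (PySem.List.enumerate (pre ++ '\n' :: rest) s) cl ls
        = pvALoop line (PySem.List.enumerate rest (s + pre.length + 1)) (cl + 1) (s + pre.length + 1) := by
  induction pre with
  | nil =>
    intro s cl ls hcl
    rw [List.nil_append, PySem.List.enumerate_cons]
    simp only [pvALoop, if_neg hcl, if_pos rfl]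
    norm_num
  | cons c t ih =>
    intro s cl ls hcl
    have hc : ¬ c = '\n' := h c (List.mem_cons_self ..)
    rw [List.cons_append, PySem.List.enumerate_cons]
    simp only [pvALoop, if_neg hcl, if_neg hc]
    rw [ih (fun x hx => h x (List.mem_cons_of_mem _ hx)) (s + 1) cl ls hcl]
    have e : s + 1 + ((t.length : Int)) + 1 = s + (((c :: t).length : Int)) + 1 := by
      simp [List.length_cons]; ring
    rw [e]

-- shifting the line number by 1 and all indices by k
theorem pvLoopShift (line k : Int) :
    ∀ (cs : List Char) (s cl ls : Int),
      pvALoop (line + 1) (PySem.List.enumerate cs (s + k)) (cl + 1) (ls + k)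
        = ((pvALoop line (PySem.List.enumerate cs s) cl ls).1 + 1,
           (pvALoop line (PySem.List.enumerate cs s) cl ls).2.1 + k,
           (pvALoop line (PySem.List.enumerate cs s) cl ls).2.2) := by
  intro cs
  induction cs with
  | nil => intro s cl ls; simp [PySem.List.enumerate_nil, pvALoop]
  | cons c t ih =>
    intro s cl ls
    rw [PySem.List.enumerate_cons, PySem.List.enumerate_cons]
    by_cases hcl : cl = line
    · have hcl' : cl + 1 = line + 1 := by omega
      simp only [pvALoop, if_pos hcl, if_pos hcl']
    · have hcl' : ¬ (cl + 1 = line + 1) := by omega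
      simp only [pvALoop, if_neg hcl, if_neg hcl']
      by_cases hc : c = '\n'
      · simp only [if_pos hc]
        have e : s + k + 1 = s + 1 + k := by ring
        rw [e]
        exact ih (s + 1) (cl + 1) (s + 1)
      · simp only [if_neg hc]
        have e : s + k + 1 = s + 1 + k := by ring
        rw [e]
        exact ih (s + 1) cl ls

-- line_start stays within [0, s + len cs]
theorem pvLoopLsBound (line : Int) :
    ∀ (cs : List Char) (s cl ls : Int), 0 ≤ ls → ls ≤ s →
      0 ≤ (pvALoop line (PySem.List.enumerate cs s) cl ls).2.1 ∧
      (pvALoop line (PySem.List.enumerate cs s) cl ls).2.1 ≤ s + cs.length := by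
  intro cs
  induction cs with
  | nil => intro s cl ls h0 h1; simp [PySem.List.enumerate_nil, pvALoop]; omega
  | cons c t ih =>
    intro s cl ls h0 h1
    rw [PySem.List.enumerate_cons]
    simp only [pvALoop]
    split_ifs with hcl hc
    · simp only [List.length_cons]
      constructor
      · exact h0
      · push_cast; omega
    · have := ih (s + 1) (cl + 1) (s + 1) (by omega) (le_refl _)
      simp only [List.length_cons]
      push_cast at this ⊢
      omega
    · have := ih (s + 1) cl ls h0 (by omega)
      simp only [List.length_cons]
      push_cast at this ⊢
      omega

theorem pvFindNoNl (l : List Char) (h : ∀ c ∈ l, ¬ c = '\n') :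
    PySem.Chars.find l ['\n'] = -1 := by
  rw [PySem.Chars.find_eq_neg_one_iff]
  intro hinf
  exact h '\n' (hinf.sublist.subset (by simp)) rfl

theorem pvFindPre (pre rest : List Char) (h : ∀ c ∈ pre, ¬ c = '\n') :
    PySem.Chars.find (pre ++ '\n' :: rest) ['\n'] = (pre.length : Int) := by
  have hinf : ['\n'] <:+: pre ++ '\n' :: rest := ⟨pre, rest, by simp⟩
  have h0 : 0 ≤ PySem.Chars.find (pre ++ '\n' :: rest) ['\n'] :=
    (PySem.Chars.find_nonneg_iff _ _).mpr hinf
  obtain ⟨hpref, hmin⟩ := PySem.Chars.find_spec h0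
  set K := (PySem.Chars.find (pre ++ '\n' :: rest) ['\n']).toNat with hKdef
  have hKle : K ≤ pre.length := by
    by_contra hgt
    push_neg at hgt
    refine hmin pre.length hgt ?_
    rw [List.drop_left]
    exact ⟨rest, rfl⟩
  have hKge : ¬ K < pre.length := by
    intro hlt
    have hdrop : List.drop K (pre ++ '\n' :: rest) = List.drop K pre ++ '\n' :: rest := by
      rw [List.drop_append, Nat.sub_eq_zero_of_le hlt.le, List.drop_zero]
    have hcons : List.drop K pre = pre[K] :: List.drop (K + 1) pre :=
      (List.getElem_cons_drop hlt).symm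
    have hp : ['\n'] <+: pre[K] :: (List.drop (K + 1) pre ++ '\n' :: rest) := by
      rw [← List.cons_append, ← hcons, ← hdrop]
      exact hpref
    exact h pre[K] (List.getElem_mem hlt) ((List.cons_prefix_cons.mp hp).1).symm
  have hK : K = pre.length := by omega
  calc PySem.Chars.find (pre ++ '\n' :: rest) ['\n']
      = ((K : Nat) : Int) := (Int.toNat_of_nonneg h0).symm
    _ = (pre.length : Int) := by rw [hK]

-- decomposition of a string containing a newline
theorem pvSplitExists (cs : List Char) (hin : '\n' ∈ cs) :
    ∃ pre rest, cs = pre ++ '\n' :: rest ∧ ∀ c ∈ pre, ¬ c = '\n' := by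
  induction cs with
  | nil => simp at hin
  | cons c t ih =>
    by_cases hc : c = '\n'
    · exact ⟨[], t, by simp [hc], by simp⟩
    · have hint : '\n' ∈ t := by
        rcases List.mem_cons.mp hin with h | h
        · exact absurd h.symm hc
        · exact h
      obtain ⟨pre, rest, hsp, hpre⟩ := ih hint
      exact ⟨c :: pre, rest, by simp [hsp], by
        intro x hx
        rcases List.mem_cons.mp hx with h | h
        · exact h ▸ hc
        · exact hpre x h⟩

theorem pvTakeWhilePre (pre rest : List Char) (h : ∀ c ∈ pre, ¬ c = '\n') :
    (pre ++ '\n' :: rest).takeWhile (fun c => c != '\n') = pre := by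
  induction pre with
  | nil => simp [List.takeWhile_cons]
  | cons c t ih =>
    have hc : ¬ c = '\n' := h c (List.mem_cons_self ..)
    rw [List.cons_append, List.takeWhile_cons]
    simp only [bne_iff_ne, ne_eq, hc, not_false_eq_true, decide_true, if_true]
    rw [ih (fun x hx => h x (List.mem_cons_of_mem _ hx))]

theorem pvDropWhilePre (pre rest : List Char) (h : ∀ c ∈ pre, ¬ c = '\n') :
    (pre ++ '\n' :: rest).dropWhile (fun c => c != '\n') = '\n' :: rest := by
  induction pre with
  | nil => simp [List.dropWhile_cons]
  | cons c t ih =>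
    have hc : ¬ c = '\n' := h c (List.mem_cons_self ..)
    rw [List.cons_append, List.dropWhile_cons]
    simp only [bne_iff_ne, ne_eq, hc, not_false_eq_true, decide_true, if_true]
    exact ih (fun x hx => h x (List.mem_cons_of_mem _ hx))

-- evaluated form of A's post-loop processing
theorem pvPostA_eval (cs : List Char) (line ch a b : Int) (br : Bool) :
    pvPostA cs line ch (a, b, br) =
      (if a = line then
        (if ch > (if PySem.Chars.findFrom cs ['\n'] b none < 0 then (cs.length : Int)
                  else PySem.Chars.findFrom cs ['\n'] b none) - b
         then none else some (b + ch))
       else none) := by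
  by_cases h : a = line
  · subst h
    cases br <;> simp [pvPostA]
  · have h' : ¬ line = a := fun hh => h hh.symm
    cases br <;> simp [pvPostA, h, h']

-- A's post-loop processing commutes with shifting by the first line's length + 1
theorem pvPostShift (pre rest : List Char) (hpre : ∀ c ∈ pre, ¬ c = '\n') (line ch a b : Int)
    (br : Bool) (hb0 : 0 ≤ b) (hb1 : b ≤ (rest.length : Int)) :
    pvPostA (pre ++ '\n' :: rest) line ch (a + 1, b + ((pre.length : Int) + 1), br)
      = Option.map (fun v => ((pre.length : Int) + 1) + v) (pvPostA rest (line - 1) ch (a, b, br)) := by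
  rw [pvPostA_eval, pvPostA_eval]
  by_cases ha : a = line - 1
  case neg =>
    rw [if_neg (by omega), if_neg ha]
    rfl
  case pos =>
    rw [if_pos (by omega), if_pos ha]
    have hm : b.toNat + (pre.length + 1) ≤ (pre ++ '\n' :: rest).length := by
      simp only [List.length_append, List.length_cons]
      omega
    have hcast : ((b.toNat + (pre.length + 1) : Nat) : Int) = b + ((pre.length : Int) + 1) := by
      push_cast
      omega
    have hbb : ((b.toNat : Nat) : Int) = b := Int.toNat_of_nonneg hb0
    have hdropF : List.drop (b.toNat + (pre.length + 1)) (pre ++ '\n' :: rest)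
        = List.drop b.toNat rest := by
      have hsp : pre ++ '\n' :: rest = (pre ++ ['\n']) ++ rest := by simp
      have hle : (pre ++ ['\n']).length ≤ b.toNat + (pre.length + 1) := by
        simp only [List.length_append, List.length_cons, List.length_nil]
        omega
      have e2 : b.toNat + (pre.length + 1) - (pre ++ ['\n']).length = b.toNat := by
        simp only [List.length_append, List.length_cons, List.length_nil]
        omega
      rw [hsp, List.drop_append, List.drop_eq_nil_of_le hle, e2, List.nil_append]
    have hFF : PySem.Chars.findFrom (pre ++ '\n' :: rest) ['\n'] (b + ((pre.length : Int) + 1)) none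
        = (if PySem.Chars.find (List.drop b.toNat rest) ['\n'] = -1 then -1
           else ((b.toNat + (pre.length + 1) : Nat) : Int)
                + PySem.Chars.find (List.drop b.toNat rest) ['\n']) := by
      rw [← hcast, PySem.Chars.findFrom_natCast _ _ _ hm, hdropF]
    have hFR : PySem.Chars.findFrom rest ['\n'] b none
        = (if PySem.Chars.find (List.drop b.toNat rest) ['\n'] = -1 then -1
           else ((b.toNat : Nat) : Int) + PySem.Chars.find (List.drop b.toNat rest) ['\n']) := by
      conv_lhs => rw [← hbb]
      rw [PySem.Chars.findFrom_natCast _ _ _ (by omega)]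
    rw [hFF, hFR]
    have hfge : -1 ≤ PySem.Chars.find (List.drop b.toNat rest) ['\n'] :=
      PySem.Chars.neg_one_le_find _ _
    by_cases hf : PySem.Chars.find (List.drop b.toNat rest) ['\n'] = -1
    · rw [if_pos hf, if_pos hf]
      simp only [List.length_append, List.length_cons]
      push_cast
      split_ifs <;>
        first
          | rfl
          | (exfalso; omega)
          | (simp only [Option.map_some]; congr 1; ring)
    · have hf0 : 0 ≤ PySem.Chars.find (List.drop b.toNat rest) ['\n'] := by omega
      rw [if_neg hf, if_neg hf, hcast, hbb]
      split_ifs <;>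
        first
          | rfl
          | (exfalso; omega)
          | (simp only [Option.map_some]; congr 1; ring)

-- main equivalence on the character list, by strong induction on its length
theorem pvMain (n : Nat) :
    ∀ (cs : List Char), cs.length ≤ n → ∀ (line ch : Int), 0 ≤ line →
      pvPostA cs line ch (pvALoop line (PySem.List.enumerate cs 0) 0 0) = pvLineRec cs line ch := by
  induction n with
  | zero =>
    intro cs hlen line ch hline
    have hnil : cs = [] := List.eq_nil_of_length_eq_zero (Nat.le_zero.mp hlen)
    subst hnil
    rw [pvLineRec]
    simp only [PySem.List.enumerate_nil, pvALoop]
    rw [pvPostA_eval]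
    by_cases hl0 : line = 0
    · subst hl0
      rw [if_pos rfl, PySem.Chars.findFrom_zero, pvFindNoNl [] (by simp),
        if_pos (show (-1 : Int) < 0 by norm_num)]
      simp only [List.length_nil, List.takeWhile_nil, Nat.cast_zero]
      by_cases hch : ch ≤ (0 : Int)
      · rw [if_neg (by omega : ¬ ch > (0 : Int) - 0)]
        simp [hch]
      · rw [if_pos (by omega : ch > (0 : Int) - 0)]
        simp [hch]
    · rw [if_neg (fun h => hl0 h.symm), if_neg hl0]
      simp [hl0]
  | succ n ih =>
    intro cs hlen line ch hline
    by_cases hl0 : line = 0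
    · subst hl0
      have hbreak : pvALoop 0 (PySem.List.enumerate cs 0) 0 0 = (0, 0, false) ∨
          pvALoop 0 (PySem.List.enumerate cs 0) 0 0 = (0, 0, true) := by
        cases cs with
        | nil => left; simp [PySem.List.enumerate_nil, pvALoop]
        | cons c t => right; rw [PySem.List.enumerate_cons]; simp [pvALoop]
      rcases hbreak with h | h <;> rw [h, pvPostA_eval] <;> {
        rw [if_pos rfl, PySem.Chars.findFrom_zero, pvLineRec]
        by_cases hin : '\n' ∈ cs
        · obtain ⟨pre, rest, hsp, hpre⟩ := pvSplitExists cs hin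
          subst hsp
          rw [pvFindPre pre rest hpre, pvTakeWhilePre pre rest hpre,
            if_neg (by omega : ¬ ((pre.length : Int) < 0))]
          by_cases hch : ch ≤ (pre.length : Int)
          · rw [if_neg (by omega : ¬ ch > (pre.length : Int) - 0)]
            simp [hch]
          · rw [if_pos (by omega : ch > (pre.length : Int) - 0)]
            simp [hch]
        · rw [pvFindNoNl cs (fun c hc hh => hin (by rw [← hh]; exact hc)),
            if_pos (show (-1 : Int) < 0 by norm_num)]
          have hall : cs.takeWhile (fun c => c != '\n') = cs :=
            List.takeWhile_eq_self_iff.mpr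
              (by intro x hx; simpa using fun hh => hin (by rw [← hh]; exact hx))
          rw [hall]
          by_cases hch : ch ≤ (cs.length : Int)
          · rw [if_neg (by omega : ¬ ch > (cs.length : Int) - 0)]
            simp [hch]
          · rw [if_pos (by omega : ch > (cs.length : Int) - 0)]
            simp [hch]
      }
    · have hcl0 : (0 : Int) ≠ line := fun h => hl0 h.symm
      by_cases hin : '\n' ∈ cs
      · obtain ⟨pre, rest, hsp, hpre⟩ := pvSplitExists cs hin
        subst hsp
        rw [pvLoopSplit line pre rest hpre 0 0 0 hcl0]
        have e1 : (0 : Int) + (pre.length : Int) + 1 = 0 + ((pre.length : Int) + 1) := by ring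
        rw [e1]
        have e3 : line = (line - 1) + 1 := by ring
        rw [e3]
        have hshift := pvLoopShift (line - 1) ((pre.length : Int) + 1) rest 0 0 0
        simp only [zero_add] at hshift ⊢
        rw [hshift]
        rw [← e3]
        have hbnd := pvLoopLsBound (line - 1) rest 0 0 0 le_rfl le_rfl
        simp only [zero_add] at hbnd
        rw [pvPostShift pre rest hpre line ch _ _ _ hbnd.1 hbnd.2]
        simp only [Prod.mk.eta]
        have hlen' : rest.length ≤ n := by
          simp only [List.length_append, List.length_cons] at hlen
          omega
        rw [ih rest hlen' (line - 1) ch (by omega)]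
        conv_rhs => rw [pvLineRec]
        simp only [if_neg hl0]
        have hany : ((pre ++ '\n' :: rest).any (fun c => c == '\n')) = true := by simp
        rw [dif_pos hany]
        rw [pvTakeWhilePre pre rest hpre, pvDropWhilePre pre rest hpre]
        simp only [List.tail_cons]
        cases hx : pvLineRec rest (line - 1) ch <;> simp [hx]
      · rw [pvLoopSkip line cs (fun c hc hh => hin (by rw [← hh]; exact hc)) 0 0 0 hcl0]
        rw [pvPostA_eval, if_neg hcl0]
        rw [pvLineRec]
        have hany : (cs.any (fun c => c == '\n')) = false := by
          rw [List.any_eq_false]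
          intro x hx
          simpa using fun hh => hin (by rw [← hh]; exact hx)
        simp [hl0, hany]

-- ===== VERDICT (by name: the statement is the Claim_ definition above) =====
theorem offset_at_position_spec : Claim_equal_offset_at_position := by
  intro text line character _
  unfold Spec_offset_at_position offset_at_position offset_at_position_alt
  by_cases hg : line < 0 ∨ character < 0
  · have : (decide (line < 0) || decide (character < 0)) = true := by
      rcases hg with h | h <;> simp [h]
    simp [this]
  · push_neg at hg
    have : (decide (line < 0) || decide (character < 0)) = false := by
      simp; omega
    simp only [this, Bool.false_eq_true, if_false]
    exact pvMain text.toList.length text.toList le_rfl line character hg.1
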